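-- pv_equiv track=rewrite | github.com/grigorymaiorow/python_dz | DZ3/Задача5.py | get_two_numb
-- ===== SOURCE A (Python) =====
-- def get_two_numb (num):
--     numb_1 = 1
--     numb_2 = 1
--     fibo_nums = []
--     for i in range(num):
--         fibo_nums.append(numb_1)
--         numb_1, numb_2 = numb_2, numb_1 + numb_2
--     numb_1 = 0
--     numb_2 = 1
--     for i in range(num+1):
--         fibo_nums.insert(0, numb_1)
--         numb_1, numb_2 = numb_2, numb_1 - numb_2
--     return fibo_nums
-- ===== SOURCE B (Python) =====
-- def get_two_numb(num):
--     if num < 0: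
--         return []
--     fibs = [0]
--     a, b = 0, 1
--     for _ in range(num):
--         fibs.append(b)
--         a, b = b, a + b
--     negs = [fibs[k] if k % 2 == 1 else -fibs[k] for k in range(num, 0, -1)]
--     return negs + fibs
-- ===== Notes on version B (the rewrite author's own statement) =====
-- stated objective: alternative
-- what changed: B builds only the nonnegative Fibonacci prefix with one forward append loop and derives the negative half by the negafibonacci sign identity (F of -k is F(k) with alternating sign) over the already-computed values, instead of A's second backward-recurrence loop that repeatedly inserts at the front of the list.
import Mathlib
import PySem

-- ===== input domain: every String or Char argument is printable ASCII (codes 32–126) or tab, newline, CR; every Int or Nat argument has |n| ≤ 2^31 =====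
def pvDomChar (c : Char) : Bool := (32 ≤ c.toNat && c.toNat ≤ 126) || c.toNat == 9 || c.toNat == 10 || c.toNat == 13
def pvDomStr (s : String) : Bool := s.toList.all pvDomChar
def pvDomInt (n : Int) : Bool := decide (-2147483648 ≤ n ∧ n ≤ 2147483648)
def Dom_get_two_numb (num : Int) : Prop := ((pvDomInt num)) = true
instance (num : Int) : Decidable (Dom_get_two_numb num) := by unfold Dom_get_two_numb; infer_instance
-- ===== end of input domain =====

-- B derives the negative Fibonacci half via the negafibonacci sign identity over the forward-computed prefix, replacing A's backward-recurrence insert-at-front loop (objective: alternative algorithm).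
-- negafibonacci sign identity over the forward-computed Fibonacci prefix (objective: simpler).


-- ===== PORT A =====
def get_two_numb (num : Int) : List Int :=
  let s1 := (PySem.List.pyRange 0 num 1).foldl
    (fun (s : Int × Int × List Int) _ =>
      let (n1, n2, l) := s
      (n2, n1 + n2, l ++ [n1])) (1, 1, [])
  let s2 := (PySem.List.pyRange 0 (num + 1) 1).foldl
    (fun (s : Int × Int × List Int) _ =>
      let (n1, n2, l) := s
      (n2, n1 - n2, n1 :: l)) (0, 1, s1.2.2)
  s2.2.2

-- ===== PORT B =====
-- fibs[k] with 1 ≤ k < len(fibs) always in range in Source B; ported with pyGetD (exact there)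
def get_two_numb_alt (num : Int) : List Int :=
  if num < 0 then []
  else
    let st := (PySem.List.pyRange 0 num 1).foldl
      (fun (s : List Int × Int × Int) _ =>
        let (fibs, a, b) := s
        (fibs ++ [b], b, a + b)) ([0], 0, 1)
    let fibs := st.1
    let negs := (PySem.List.pyRange num 0 (-1)).map
      (fun k => if PySem.Int.mod k 2 = 1 then PySem.List.pyGetD fibs k 0
                else -(PySem.List.pyGetD fibs k 0))
    negs ++ fibs

-- ===== PRECONDITION & SPEC =====
def Spec_get_two_numb (num : Int) (out : List Int) : Prop := out = get_two_numb_alt num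
instance (num : Int) (out : List Int) : Decidable (Spec_get_two_numb num out) := by unfold Spec_get_two_numb; infer_instance

-- ===== CLAIM (what is proved, stated in full; the proofs are below) =====
def Claim_equal_get_two_numb : Prop := ∀ (num : Int), Dom_get_two_numb num → Spec_get_two_numb num (get_two_numb num)

-- ===== LEMMAS AND PROOFS =====

-- positive fibonacci
def pvFib : Nat → Int
  | 0 => 0
  | 1 => 1
  | n + 2 => pvFib n + pvFib (n + 1)

-- negafibonacci: pvNeg j = F(-j)
def pvNeg : Nat → Int
  | 0 => 0
  | 1 => 1
  | n + 2 => pvNeg n - pvNeg (n + 1)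

lemma pvNeg_sign : ∀ k : Nat, pvNeg k = if k % 2 = 1 then pvFib k else -(pvFib k) := by
  intro k
  induction k using Nat.strong_induction_on with
  | _ k ih =>
    match k with
    | 0 => simp [pvNeg, pvFib]
    | 1 => simp [pvNeg, pvFib]
    | n + 2 =>
      rw [pvNeg, ih n (by omega), ih (n+1) (by omega), pvFib]
      rcases Nat.mod_two_eq_zero_or_one n with h1 | h1 <;> split_ifs <;> omega

-- A's first loop
lemma lemA1 (n : Nat) :
    ((List.range n).foldl
      (fun (s : Int × Int × List Int) _ =>
        let (n1, n2, l) := s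
        (n2, n1 + n2, l ++ [n1])) (1, 1, [])) =
    (pvFib (n+1), pvFib (n+2), (List.range n).map (fun k => pvFib (k+1))) := by
  induction n with
  | zero => simp [pvFib]
  | succ m ih =>
    rw [List.range_succ, List.foldl_append, ih, List.foldl_cons, List.foldl_nil]
    have : pvFib (m + 3) = pvFib (m + 1) + pvFib (m + 2) := by rw [pvFib]
    simp [this]

-- A's second loop (prepending loop), generalized over the starting list
lemma lemA2 (n : Nat) (l : List Int) :
    ((List.range n).foldl
      (fun (s : Int × Int × List Int) _ =>
        let (n1, n2, l) := s
        (n2, n1 - n2, n1 :: l)) (0, 1, l)) =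
    (pvNeg n, pvNeg (n+1), ((List.range n).reverse.map pvNeg) ++ l) := by
  induction n with
  | zero => simp [pvNeg]
  | succ m ih =>
    rw [List.range_succ, List.foldl_append, ih, List.foldl_cons, List.foldl_nil]
    have : pvNeg (m + 2) = pvNeg m - pvNeg (m + 1) := by rw [pvNeg]
    simp [this]

-- B's loop
lemma lemB1 (n : Nat) :
    ((List.range n).foldl
      (fun (s : List Int × Int × Int) _ =>
        let (fibs, a, b) := s
        (fibs ++ [b], b, a + b)) ([0], 0, 1)) =
    ((List.range (n+1)).map (fun k => pvFib k), pvFib n, pvFib (n+1)) := by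
  induction n with
  | zero => simp [pvFib]
  | succ m ih =>
    rw [List.range_succ, List.foldl_append, ih, List.foldl_cons, List.foldl_nil]
    have : pvFib (m + 2) = pvFib m + pvFib (m + 1) := by rw [pvFib]
    simp [this, List.range_succ (n := m + 1)]

lemma pyRange_zero_cast (n : Nat) :
    PySem.List.pyRange 0 (n : Int) 1 = (List.range n).map (fun k : Nat => (k : Int)) := by
  rw [PySem.List.pyRange_one]
  simp only [Int.sub_zero, Int.toNat_natCast]
  apply List.map_congr_left
  intro k _
  omega

lemma foldl_const {α β γ : Type} (f : α → β) (g : γ → γ) :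
    ∀ (xs : List α) (init : γ), ((xs.map f).foldl (fun acc _ => g acc) init)
      = xs.foldl (fun acc _ => g acc) init := by
  intro xs
  induction xs with
  | nil => intro init; rfl
  | cons x xs ih => intro init; simp only [List.map_cons, List.foldl_cons, ih]

-- value of B's indexing into fibs
lemma pyGetD_fibs (n j : Nat) (hj : j < n + 1) :
    PySem.List.pyGetD ((List.range (n+1)).map (fun k => pvFib k)) (j : Int) 0 = pvFib j := by
  rw [PySem.List.pyGetD_of_nonneg _ _ (by positivity)]
  simp [hj]

-- reversed negafibonacci segment, expressed the way B's countdown map produces it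
lemma hrev (n : Nat) :
    (List.range (n+1)).reverse.map pvNeg
      = (List.range n).map (fun k => pvNeg (n - k)) ++ [pvNeg 0] := by
  induction n with
  | zero => simp
  | succ m ih =>
    rw [List.range_succ (n := m + 1), List.reverse_append, List.reverse_singleton,
      List.singleton_append, List.map_cons, ih, List.range_succ_eq_map, List.map_cons,
      List.map_map]
    simp only [Function.comp_def, Nat.succ_sub_succ, Nat.sub_zero, List.cons_append]

-- main equality for nonnegative arguments
lemma main_eq (n : Nat) : get_two_numb (n : Int) = get_two_numb_alt (n : Int) := by
  simp only [get_two_numb, get_two_numb_alt]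
  rw [if_neg (by omega)]
  have hr1 : PySem.List.pyRange 0 ((n : Int) + 1) 1
      = (List.range (n+1)).map (fun k : Nat => (k : Int)) := by
    rw [show ((n : Int) + 1) = ((n + 1 : Nat) : Int) by push_cast; ring, pyRange_zero_cast]
  rw [pyRange_zero_cast, hr1, foldl_const, foldl_const, foldl_const, lemA1, lemB1]
  simp only
  rw [lemA2]
  simp only
  -- rewrite B's countdown range
  have hneg : PySem.List.pyRange (n : Int) 0 (-1)
      = (List.range n).map (fun k => ((n - k : Nat) : Int)) := by
    rw [PySem.List.pyRange_neg_one]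
    simp only [Int.sub_zero, Int.toNat_natCast]
    apply List.map_congr_left
    intro k hk
    have hk' : k < n := List.mem_range.mp hk
    push_cast [Nat.cast_sub (le_of_lt hk')]
    ring
  rw [hneg, List.map_map]
  -- evaluate B's map body on each element n - k (with 1 ≤ n - k ≤ n)
  have hbody : ((List.range n).map
      ((fun k => if PySem.Int.mod k 2 = 1 then
          PySem.List.pyGetD ((List.range (n+1)).map (fun k => pvFib k)) k 0
        else -(PySem.List.pyGetD ((List.range (n+1)).map (fun k => pvFib k)) k 0))
        ∘ (fun k => ((n - k : Nat) : Int))))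
      = (List.range n).map (fun k => pvNeg (n - k)) := by
    apply List.map_congr_left
    intro k hk
    have hk' : k < n := List.mem_range.mp hk
    simp only [Function.comp]
    rw [pyGetD_fibs n (n - k) (by omega)]
    rw [show (2 : Int) = ((2 : Nat) : Int) by norm_num, PySem.Int.mod_natCast, pvNeg_sign]
    rcases Nat.even_or_odd (n - k) with h | h
    · have h1 : (n - k) % 2 = 0 := Nat.even_iff.mp h
      rw [if_neg (by omega), if_neg (by simp [h1])]
    · have h1 : (n - k) % 2 = 1 := Nat.odd_iff.mp h
      rw [if_pos (by omega), if_pos (by simp [h1])]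
  rw [hbody, hrev]
  -- peel fib 0 = pvNeg 0 off the head of B's fibs list
  rw [List.range_succ_eq_map, List.map_cons, List.map_map]
  have h0 : pvFib 0 = pvNeg 0 := by rfl
  simp [h0, Function.comp]

-- ===== VERDICT (by name: the statement is the Claim_ definition above) =====
theorem get_two_numb_spec : Claim_equal_get_two_numb := by
  intro num _
  unfold Spec_get_two_numb
  by_cases h : 0 ≤ num
  · obtain ⟨n, rfl⟩ := Int.eq_ofNat_of_zero_le h
    exact main_eq n
  · unfold get_two_numb get_two_numb_alt
    rw [if_pos (by omega)]
    rw [PySem.List.pyRange_one_eq_nil (by omega), PySem.List.pyRange_one_eq_nil (by omega)]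
    rfl
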